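-- pv_equiv track=rewrite | github.com/f1r3k3rn/codeforces | contests/codeTON9/B.py | solve
-- ===== SOURCE A (Python) =====
-- def solve(a):
--     sol = -1
--     a = a.strip()
--     for i in range(len(a) - 1):
--         if a[i] == a[i + 1]:
--             sol = a[i : i + 2]
--         elif i < len(a) - 2 and a[i] != a[i + 1] and a[i + 1] != a[i + 2] and a[i] != a[i + 2]:
--             sol = a[i : i + 3]
--
--     return sol
-- ===== SOURCE B (Python) =====
-- def solve(a):
--     a = a.strip()
--     n = len(a)
--     p = max((i for i in range(n - 1) if a[i] == a[i + 1]), default=-1)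
--     t = max((i for i in range(n - 2)
--              if a[i] != a[i + 1] and a[i + 1] != a[i + 2] and a[i] != a[i + 2]),
--             default=-1)
--     if p > t:
--         return a[p:p + 2]
--     if t >= 0:
--         return a[t:t + 3]
--     return -1
-- ===== Notes on version B (the rewrite author's own statement) =====
-- stated objective: alternative
-- what changed: A makes one forward scan overwriting sol with the latest pair/triple match; B instead computes two independent maxima (last adjacent-equal-pair index and last pairwise-distinct-triple index) with max() over generator filters and slices at whichever index is larger.
-- outside the precondition, e.g. on solve('ab'): A returns -1, B returns -1
import Mathlib
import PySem

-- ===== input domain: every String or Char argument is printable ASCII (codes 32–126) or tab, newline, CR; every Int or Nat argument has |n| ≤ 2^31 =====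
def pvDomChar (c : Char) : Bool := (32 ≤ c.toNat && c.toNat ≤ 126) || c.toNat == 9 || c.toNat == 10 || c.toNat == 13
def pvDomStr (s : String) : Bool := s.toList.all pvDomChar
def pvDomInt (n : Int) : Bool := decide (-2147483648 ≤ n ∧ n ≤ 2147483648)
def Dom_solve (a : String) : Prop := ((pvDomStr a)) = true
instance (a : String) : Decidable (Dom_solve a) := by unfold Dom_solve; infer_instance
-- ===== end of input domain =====

-- B replaces A's single forward scan (which overwrites sol with the latest match) by two
-- independent searches — the last adjacent-equal-pair index and the last pairwise-distinct
-- triple index — and returns the slice at whichever index is larger; same result.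

-- ===== PORT A =====
-- A's loop body: overwrite sol with the pair a[i:i+2] when a[i]==a[i+1], else with the
-- distinct triple a[i:i+3] when i < len(a)-2 and the three chars are pairwise distinct.
def solveStep (s : List Char) (n : Nat) (sol : Option String) (i : Nat) : Option String :=
  if s[i]? = s[i+1]? then some (String.ofList ((s.drop i).take 2))
  else if i < n - 2 ∧ s[i]? ≠ s[i+1]? ∧ s[i+1]? ≠ s[i+2]? ∧ s[i]? ≠ s[i+2]? then
    some (String.ofList ((s.drop i).take 3))
  else sol

-- sol starts as -1 (an int); on Pre_ inputs the loop assigns a string, so sol is tracked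
-- as an Option String starting at none ("" stands for the never-claimed -1 case).
def solve (a : String) : String :=
  let s := (PySem.Str.strip a).toList
  let n := s.length
  (((List.range (n - 1)).foldl (solveStep s n) none).getD "")

-- ===== PORT B =====
-- p = max index of an adjacent equal pair (Python max(generator, default=-1) → List.max?)
def pairIdxs (s : List Char) : List Nat :=
  (List.range (s.length - 1)).filter (fun i => s[i]? == s[i+1]?)

-- t = max index of a pairwise-distinct triple
def tripIdxs (s : List Char) : List Nat :=
  (List.range (s.length - 2)).filter
    (fun i => s[i]? != s[i+1]? && s[i+1]? != s[i+2]? && s[i]? != s[i+2]?)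

-- 'if p > t: pair slice; elif t >= 0: triple slice; else -1' ("" stands for B's -1 case)
def solve_alt (a : String) : String :=
  let s := (PySem.Str.strip a).toList
  match (pairIdxs s).max?, (tripIdxs s).max? with
  | some p, some t => if p > t then String.ofList ((s.drop p).take 2)
                      else String.ofList ((s.drop t).take 3)
  | some p, none   => String.ofList ((s.drop p).take 2)
  | none,   some t => String.ofList ((s.drop t).take 3)
  | none,   none   => ""

-- ===== PRECONDITION & SPEC =====
-- Pre_ excludes the inputs with no adjacent equal pair and no pairwise-distinct triple in the
-- stripped string: there A returns the int -1, not a value of the declared String type.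
def Pre_solve (a : String) : Prop :=
  let s := (PySem.Str.strip a).toList
  ∃ i ∈ List.range (s.length - 1),
    s[i]? = s[i+1]? ∨
      (i + 2 < s.length ∧ s[i+1]? ≠ s[i+2]? ∧ s[i]? ≠ s[i+2]?)
instance (a : String) : Decidable (Pre_solve a) := by unfold Pre_solve; infer_instance

def pvWitness_solve : String := "abc"

def Spec_solve (a : String) (out : String) : Prop := out = solve_alt a
instance (a : String) (out : String) : Decidable (Spec_solve a out) := by unfold Spec_solve; infer_instance

-- ===== CLAIM (what is proved, stated in full; the proofs are below) =====
def Claim_equal_solve : Prop := ∀ (a : String), Dom_solve a → Pre_solve a → Spec_solve a (solve a)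

-- ===== LEMMAS AND PROOFS =====

-- partial versions of B's two maxima, with A's in-loop guard i < n - 2 kept on the triple side
def Pm (s : List Char) (m : Nat) : Option Nat :=
  ((List.range m).filter (fun i => s[i]? == s[i+1]?)).max?

def Tm (s : List Char) (n m : Nat) : Option Nat :=
  ((List.range m).filter
    (fun i => decide (i < n - 2) && (s[i]? != s[i+1]?) && (s[i+1]? != s[i+2]?) && (s[i]? != s[i+2]?))).max?

-- B's final selection, as a function of the two maxima
def render (s : List Char) : Option Nat → Option Nat → String
  | some p, some t => if p > t then String.ofList ((s.drop p).take 2)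
                      else String.ofList ((s.drop t).take 3)
  | some p, none   => String.ofList ((s.drop p).take 2)
  | none,   some t => String.ofList ((s.drop t).take 3)
  | none,   none   => ""

theorem max?_concat_of_lt (l : List Nat) (m : Nat) (h : ∀ x ∈ l, x < m) :
    (l ++ [m]).max? = some m := by
  rw [List.max?_eq_some_iff]
  constructor
  · simp
  · intro b hb
    rcases List.mem_append.1 hb with hb | hb
    · exact Nat.le_of_lt (h b hb)
    · simp_all

theorem Pm_lt (s : List Char) (m x : Nat) (hx : Pm s m = some x) : x < m := by
  have := List.max?_mem hx
  simp only [List.mem_filter, List.mem_range] at this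
  exact this.1

theorem Tm_lt (s : List Char) (n m x : Nat) (hx : Tm s n m = some x) : x < m := by
  have := List.max?_mem hx
  simp only [List.mem_filter, List.mem_range] at this
  exact this.1

theorem filter_range_succ (c : Nat → Bool) (m : Nat) :
    (List.range (m + 1)).filter c =
      (List.range m).filter c ++ (if c m then [m] else []) := by
  rw [List.range_succ, List.filter_append]
  rcases h : c m <;> simp [List.filter, h]

-- the invariant: A's accumulator after the first m iterations renders B's partial maxima
theorem inv (s : List Char) (n : Nat) :
    ∀ m, (((List.range m).foldl (solveStep s n) none).getD "") = render s (Pm s m) (Tm s n m) := by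
  intro m
  induction m with
  | zero => simp [Pm, Tm, render]
  | succ m ih =>
    rw [List.range_succ, List.foldl_append, List.foldl_cons, List.foldl_nil]
    by_cases h1 : s[m]? = s[m+1]?
    · -- pair at m: Pm gains m, Tm unchanged, and render picks the pair (m beats any t < m)
      have hP : Pm s (m+1) = some m := by
        have hc : (s[m]? == s[m+1]?) = true := by simpa using h1
        unfold Pm
        rw [filter_range_succ, if_pos hc]
        apply max?_concat_of_lt
        intro x hx
        simp only [List.mem_filter, List.mem_range] at hx
        exact hx.1
      have hT : Tm s n (m+1) = Tm s n m := by
        unfold Tm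
        rw [filter_range_succ, if_neg (by simp [h1]), List.append_nil]
      rw [hP, hT]
      simp only [solveStep, if_pos h1, Option.getD_some]
      cases hTm : Tm s n m with
      | none => simp [render]
      | some t =>
        have ht := Tm_lt s n m t hTm
        simp only [render]
        rw [if_pos ht]
    · by_cases h2 : m < n - 2 ∧ s[m]? ≠ s[m+1]? ∧ s[m+1]? ≠ s[m+2]? ∧ s[m]? ≠ s[m+2]?
      · -- triple at m: Tm gains m, Pm unchanged, render picks the triple (no pair index > m)
        have hT : Tm s n (m+1) = some m := by
          have hc : (decide (m < n - 2) && (s[m]? != s[m+1]?) && (s[m+1]? != s[m+2]?) && (s[m]? != s[m+2]?)) = true := by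
            simp only [Bool.and_eq_true, decide_eq_true_eq, bne_iff_ne]
            exact ⟨⟨⟨h2.1, h2.2.1⟩, h2.2.2.1⟩, h2.2.2.2⟩
          unfold Tm
          rw [filter_range_succ, if_pos hc]
          apply max?_concat_of_lt
          intro x hx
          simp only [List.mem_filter, List.mem_range] at hx
          exact hx.1
        have hP : Pm s (m+1) = Pm s m := by
          unfold Pm
          rw [filter_range_succ, if_neg (by simp [h1]), List.append_nil]
        rw [hP, hT]
        simp only [solveStep, if_neg h1, if_pos h2, Option.getD_some]
        cases hPm : Pm s m with
        | none => simp [render]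
        | some p =>
          have hp := Pm_lt s m p hPm
          simp only [render]
          rw [if_neg (by omega)]
      · -- neither: everything unchanged
        have hP : Pm s (m+1) = Pm s m := by
          unfold Pm
          rw [filter_range_succ, if_neg (by simp [h1]), List.append_nil]
        have hT : Tm s n (m+1) = Tm s n m := by
          have hc : ¬ ((decide (m < n - 2) && (s[m]? != s[m+1]?) && (s[m+1]? != s[m+2]?) && (s[m]? != s[m+2]?)) = true) := by
            intro hc
            simp only [Bool.and_eq_true, decide_eq_true_eq, bne_iff_ne] at hc
            exact h2 ⟨hc.1.1.1, hc.1.1.2, hc.1.2, hc.2⟩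
          unfold Tm
          rw [filter_range_succ, if_neg hc, List.append_nil]
        rw [hP, hT, ← ih]
        have h2' : ¬ (m < n - 2 ∧ s[m+1]? ≠ s[m+2]? ∧ s[m]? ≠ s[m+2]?) := fun h => h2 ⟨h.1, h1, h.2⟩
        simp [solveStep, h1, h2']

-- at m = n - 1 the guarded triple filter is B's unguarded one over range (n - 2)
theorem Tm_final (s : List Char) : Tm s s.length (s.length - 1) = (tripIdxs s).max? := by
  unfold Tm tripIdxs
  congr 1
  by_cases hn : 2 ≤ s.length
  · have h2 : s.length - 1 = (s.length - 2) + 1 := by omega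
    rw [h2, filter_range_succ, if_neg (by simp), List.append_nil]
    apply List.filter_congr
    intro x hx
    simp only [List.mem_range] at hx
    simp [hx]
  · have h1 : s.length - 1 = 0 := by omega
    have h2 : s.length - 2 = 0 := by omega
    rw [h1, h2]
    simp

theorem solve_eq_alt (a : String) : solve a = solve_alt a := by
  unfold solve solve_alt
  set s := (PySem.Str.strip a).toList with hs
  rw [inv s s.length (s.length - 1), Tm_final]
  have hP : Pm s (s.length - 1) = (pairIdxs s).max? := rfl
  rw [hP]
  cases h1 : (pairIdxs s).max? <;> cases h2 : (tripIdxs s).max? <;> simp [render, h1, h2]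

-- ===== VERDICT (by name: the statement is the Claim_ definition above) =====
theorem solve_spec : Claim_equal_solve := by
  intro a _ _
  exact solve_eq_alt a
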